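-- pv_equiv track=rewrite | github.com/MaiAnhBao/EulerPython | Euler.py | sieves_smpf
-- ===== SOURCE A (Python) =====
-- def sieves_smpf(n):
--     phi = [i for i in range(n+1)]
--     for k in range(2,(n+1)//2):
--         phi[2*k] = 2
--     i = 2
--     while i < n:
--         if phi[i] == i:
--             for j in range(i,n+1,i):
--                 if phi[j] > i:
--                     phi[j] = i
--
--         i +=1
--     phi = list(filter((2).__ne__,phi))
--     phi = list(filter((3).__ne__,phi))
--     return sum(phi) + n + n//2
-- ===== SOURCE B (Python) =====
-- def sieves_smpf(n):
--     spf = list(range(n + 1))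
--     i = 2
--     while i * i <= n:
--         if spf[i] == i:
--             for j in range(i * i, n + 1, i):
--                 if spf[j] == j:
--                     spf[j] = i
--         i += 1
--     total = 0
--     for v in spf:
--         if v != 2 and v != 3:
--             total += v
--     return total + n + n // 2
-- ===== Notes on version B (the rewrite author's own statement) =====
-- stated objective: faster
-- what changed: Replaces A's even-prefill pass plus a full outer scan i=2..n-1 (each prime marking all multiples from i with an overwrite-if-larger test) by the canonical smallest-prime-factor sieve: outer loop only while i*i<=n, marking from i*i with a mark-once spf[j]==j test, and a single conditional accumulation pass instead of two filter passes plus sum.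
import Mathlib
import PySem

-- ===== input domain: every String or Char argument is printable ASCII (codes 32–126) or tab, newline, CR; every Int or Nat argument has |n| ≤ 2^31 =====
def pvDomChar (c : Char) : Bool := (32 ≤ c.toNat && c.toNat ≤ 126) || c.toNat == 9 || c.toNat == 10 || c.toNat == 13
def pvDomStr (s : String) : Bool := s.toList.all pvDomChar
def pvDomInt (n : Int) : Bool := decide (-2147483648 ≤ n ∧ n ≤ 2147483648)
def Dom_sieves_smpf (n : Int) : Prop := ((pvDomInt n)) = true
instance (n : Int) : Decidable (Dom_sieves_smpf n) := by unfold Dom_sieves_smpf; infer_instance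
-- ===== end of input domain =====

-- B replaces A's even-prefill pass and its outer scan up to n (marking multiples from i)
-- by the canonical √n smallest-prime-factor sieve (outer loop while i*i<=n, marking from
-- i*i, mark-once test) and one conditional accumulation pass; measured faster by a
-- constant factor.

-- ===== PORT A =====
-- A Python list of ints is an Array Int (O(1) indexing, as in CPython).
-- phi[j] read / phi[j] = v: every index A and B use is nonnegative and in range, so the
-- 0-default / unchanged-array fallbacks below are never taken (exact on all reachable states).
def pvGetI (phi : Array Int) (j : Int) : Int := phi.getD j.toNat 0
def pvSetI (phi : Array Int) (j : Int) (v : Int) : Array Int := phi.setIfInBounds j.toNat v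

-- 'for j in range(i, n+1, i): if phi[j] > i: phi[j] = i'
def pvAInner (n i : Int) (phi : Array Int) : Array Int :=
  (PySem.List.pyRange i (n+1) i).foldl
    (fun phi' j => if pvGetI phi' j > i then pvSetI phi' j i else phi') phi

-- 'while i < n: if phi[i] == i: <inner>; i += 1'  (fuel = number of remaining iterations,
-- exactly (n - i).toNat at every call, so the match on 0 never cuts the loop short)
def pvAOuter (n i : Int) (fuel : Nat) (phi : Array Int) : Array Int :=
  match fuel with
  | 0 => phi
  | fuel' + 1 =>
    if i < n then
      pvAOuter n (i+1) fuel' (if pvGetI phi i == i then pvAInner n i phi else phi)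
    else phi

-- sum(...) is Python's left fold of + from 0
def sieves_smpf (n : Int) : Int :=
  (((pvAOuter n 2 ((n-2).toNat)
      ((PySem.List.pyRange 2 (PySem.Int.floordiv (n+1) 2) 1).foldl
        (fun phi k => pvSetI phi (2*k) 2)
        (PySem.List.pyRange 0 (n+1) 1).toArray)).filter
      (fun v => v != 2)).filter (fun v => v != 3)).foldl (fun acc v => acc + v) 0
    + n + PySem.Int.floordiv n 2

-- ===== PORT B =====
-- 'while i*i <= n: if spf[i] == i: for j in range(i*i, n+1, i): if spf[j] == j: spf[j] = i; i += 1'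
-- (i is Python's loop counter, a nonnegative int starting at 2: Nat is exact; fuel is an
-- upper bound on the remaining iterations — the loop stops by itself at i*i > n)
def pvBOuter (n : Int) (i : Nat) (fuel : Nat) (spf : Array Int) : Array Int :=
  match fuel with
  | 0 => spf
  | fuel' + 1 =>
    if (i:Int) * (i:Int) ≤ n then
      pvBOuter n (i+1) fuel'
        (if pvGetI spf (i:Int) == (i:Int) then
          (PySem.List.pyRange ((i:Int)*(i:Int)) (n+1) (i:Int)).foldl
            (fun spf' j => if pvGetI spf' j == j then pvSetI spf' j (i:Int) else spf') spf
         else spf)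
    else spf

def sieves_smpf_alt (n : Int) : Int :=
  ((pvBOuter n 2 ((n-1).toNat) (PySem.List.pyRange 0 (n+1) 1).toArray).foldl
      (fun t v => if v != 2 && v != 3 then t + v else t) 0)
    + n + PySem.Int.floordiv n 2

-- ===== PRECONDITION & SPEC =====
def Spec_sieves_smpf (n : Int) (out : Int) : Prop := out = sieves_smpf_alt n
instance (n : Int) (out : Int) : Decidable (Spec_sieves_smpf n out) := by unfold Spec_sieves_smpf; infer_instance

-- ===== CLAIM (what is proved, stated in full; the proofs are below) =====
def Claim_equal_sieves_smpf : Prop := ∀ (n : Int), Dom_sieves_smpf n → Spec_sieves_smpf n (sieves_smpf n)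

-- ===== LEMMAS AND PROOFS =====

/-- A length-`N` sieve state, viewed as a function of the index. -/
def rmap (N : Nat) (f : Nat → Int) : Array Int := ((List.range N).map f).toArray

/-- Sieve state after all primes `≤ i` have been marked. -/
def Mv (i m : Nat) : Int :=
  if 2 ≤ m ∧ m.minFac ≤ i then (m.minFac : Int) else (m : Int)

/-- The final content of both sieves: the smallest prime factor (index itself below 2). -/
def spfI (m : Nat) : Int := if m ≤ 1 then (m : Int) else (m.minFac : Int)

/-- The indices A's even-prefill pass writes. -/
def pvPrefillSet (n : Int) : List Int :=
  (PySem.List.pyRange 2 (PySem.Int.floordiv (n+1) 2) 1).map (fun k => 2*k)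

/-- A's state after the prefill pass. -/
def Gst (n : Int) (m : Nat) : Int := if (m:Int) ∈ pvPrefillSet n then 2 else (m:Int)

/-- A's state entering outer iteration `k` (`k ≥ 2`). -/
def AState (n : Int) (k : Nat) : Nat → Int := if k = 2 then Gst n else Mv (k-1)

lemma rmap_congr {N : Nat} {f g : Nat → Int} (h : ∀ m, m < N → f m = g m) :
    rmap N f = rmap N g :=
  congrArg List.toArray (List.map_congr_left (fun a ha => h a (List.mem_range.mp ha)))

lemma getI_rmap {N : Nat} {f : Nat → Int} (t : Nat) (h1 : t < N) :
    pvGetI (rmap N f) (t:Int) = f t := by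
  unfold pvGetI rmap
  have hsz : ((t:Int)).toNat < (((List.range N).map f).toArray).size := by
    simp [h1]
  rw [Array.getD, dif_pos hsz]
  simp

lemma setI_rmap {N : Nat} {f : Nat → Int} (t : Nat) (v : Int) (h1 : t < N) :
    pvSetI (rmap N f) (t:Int) v = rmap N (fun m => if m = t then v else f m) := by
  unfold pvSetI rmap
  apply Array.toList_inj.mp
  rw [Array.toList_setIfInBounds]
  simp only [List.toList_toArray, Int.toNat_natCast]
  apply List.ext_getElem
  · simp
  · intro m hm1 hm2
    simp only [List.getElem_set, List.getElem_map, List.getElem_range]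
    by_cases hmj : t = m
    · simp [hmj]
    · simp [hmj, Ne.symm hmj]

/-- One marking pass: each visited (distinct, in-range) index is overwritten by `w`
    when the condition on (index, current value) holds. -/
lemma mark_fold (c : Int → Int → Bool) (w : Int) (N : Nat) :
    ∀ (L : List Int) (f : Nat → Int), L.Nodup → (∀ j ∈ L, 0 ≤ j ∧ j < (N:Int)) →
    L.foldl (fun phi j => if c j (pvGetI phi j) = true then pvSetI phi j w else phi) (rmap N f)
      = rmap N (fun m => if ((m:Int) ∈ L) ∧ c (m:Int) (f m) = true then w else f m) := by
  intro L
  induction L with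
  | nil =>
    intro f _ _
    simp only [List.foldl_nil]
    exact rmap_congr (by intro m _; simp)
  | cons j t ih =>
    intro f hnd hb
    have hj0 : 0 ≤ j := (hb j (by simp)).1
    have hjN : j < (N:Int) := (hb j (by simp)).2
    obtain ⟨jn, rfl⟩ : ∃ jn : Nat, j = (jn:Int) := ⟨j.toNat, by omega⟩
    have hjnN : jn < N := by exact_mod_cast hjN
    have hjt : ((jn:Int)) ∉ t := (List.nodup_cons.mp hnd).1
    simp only [List.foldl_cons]
    rw [getI_rmap jn hjnN]
    by_cases hc : c (jn:Int) (f jn) = true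
    · rw [if_pos hc, setI_rmap jn w hjnN,
        ih _ (List.nodup_cons.mp hnd).2 (fun x hx => hb x (List.mem_cons_of_mem _ hx))]
      apply rmap_congr; intro m hm
      by_cases hmj : m = jn
      · subst hmj
        simp [hjt, hc]
      · have hmi : (m:Int) ≠ (jn:Int) := by exact_mod_cast hmj
        simp [hmj, List.mem_cons, hmi]
    · rw [if_neg hc, ih _ (List.nodup_cons.mp hnd).2 (fun x hx => hb x (List.mem_cons_of_mem _ hx))]
      apply rmap_congr; intro m hm
      by_cases hmj : m = jn
      · subst hmj
        simp [hjt, hc]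
      · have hmi : (m:Int) ≠ (jn:Int) := by exact_mod_cast hmj
        simp [List.mem_cons, hmi]

lemma nodup_pyRange_pos {a b s : Int} (hs : 0 < s) : (PySem.List.pyRange a b s).Nodup := by
  rw [PySem.List.pyRange_of_pos a b hs]
  refine List.Nodup.map ?_ List.nodup_range
  intro x y hxy
  have h1 : a + s * (x:Int) = a + s * (y:Int) := hxy
  have h2 : s * (x:Int) = s * (y:Int) := by omega
  have h3 : (x:Int) = y := mul_left_cancel₀ (ne_of_gt hs) h2
  exact_mod_cast h3

/-- Membership in `range(a, n+1, k)` when `k ∣ a`. -/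
lemma mem_pyRange_step {k : Nat} (hk : 0 < k) {n a : Int} (hadvd : (k:Int) ∣ a) (m : Nat) :
    ((m:Int) ∈ PySem.List.pyRange a (n+1) (k:Int)) ↔ (a ≤ (m:Int) ∧ (m:Int) ≤ n ∧ k ∣ m) := by
  rw [PySem.List.mem_pyRange_iff_of_pos (by exact_mod_cast hk)]
  constructor
  · rintro ⟨h1, h2, h3⟩
    refine ⟨h1, by omega, ?_⟩
    have : (k:Int) ∣ (m:Int) := by
      have := dvd_add h3 hadvd
      simpa using this
    exact_mod_cast this
  · rintro ⟨h1, h2, h3⟩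
    refine ⟨h1, by omega, ?_⟩
    have hm : (k:Int) ∣ (m:Int) := by exact_mod_cast h3
    exact dvd_sub hm hadvd

lemma minFac_two_le {m : Nat} (h : 2 ≤ m) : 2 ≤ m.minFac :=
  (Nat.minFac_prime (by omega)).two_le

lemma minFac_lt_of_not_prime {k : Nat} (hk : 2 ≤ k) (h : ¬ k.Prime) : k.minFac < k := by
  have h1 := Nat.minFac_le (show 0 < k by omega)
  have h2 : k.minFac ≠ k := fun he => h (Nat.prime_def_minFac.mpr ⟨hk, he⟩)
  omega

lemma Mv_one (m : Nat) : Mv 1 m = (m:Int) := by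
  unfold Mv
  split_ifs with h
  · exact absurd (minFac_two_le h.1) (by omega)
  · rfl

lemma Mv_prime_self {k : Nat} (hkp : k.Prime) : Mv (k-1) k = (k:Int) := by
  unfold Mv
  have hmf := (Nat.prime_def_minFac.mp hkp).2
  have hk2 := hkp.two_le
  split_ifs with h
  · exact absurd h.2 (by omega)
  · rfl

lemma Mv_step_not_prime {k : Nat} (hk : 2 ≤ k) (hnp : ¬ k.Prime) (m : Nat) :
    Mv (k-1) m = Mv k m := by
  unfold Mv
  by_cases h2 : 2 ≤ m
  · have hne : m.minFac ≠ k := fun he => hnp (he ▸ Nat.minFac_prime (by omega))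
    by_cases hle : m.minFac ≤ k - 1
    · rw [if_pos ⟨h2, hle⟩, if_pos ⟨h2, by omega⟩]
    · rw [if_neg (by omega), if_neg (by omega)]
  · rw [if_neg (by omega), if_neg (by omega)]

lemma Mv_eq_spfI {i m : Nat} (h : 2 ≤ m → m.minFac ≤ i ∨ m.Prime) : Mv i m = spfI m := by
  unfold Mv spfI
  by_cases h2 : 2 ≤ m
  · rcases h h2 with hle | hp
    · rw [if_pos ⟨h2, hle⟩, if_neg (by omega)]
    · have hmf := (Nat.prime_def_minFac.mp hp).2
      by_cases hle : m.minFac ≤ i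
      · rw [if_pos ⟨h2, hle⟩, if_neg (by omega)]
      · rw [if_neg (by omega), if_neg (by omega), hmf]
  · rw [if_neg (by omega), if_pos (by omega)]

/-- What A's marking pass with prime `k` does to one entry. -/
lemma A_mark_result {n : Int} {k m : Nat} (hkp : Nat.Prime k) (hm : (m:Int) ≤ n)
    (f : Nat → Int) (hf : f m = Mv (k-1) m ∨ (2 ≤ m ∧ m.minFac = k ∧ f m = (k:Int))) :
    (if (((k:Int) ≤ (m:Int) ∧ (m:Int) ≤ n ∧ k ∣ m) ∧ (k:Int) < f m) then (k:Int) else f m)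
      = Mv k m := by
  have hk2 := hkp.two_le
  have hkmf := (Nat.prime_def_minFac.mp hkp).2
  rcases hf with hf | ⟨h2, hmf, hfv⟩
  · by_cases h2 : 2 ≤ m
    · by_cases hlow : m.minFac ≤ k - 1
      · have hfm : f m = (m.minFac : Int) := by rw [hf]; unfold Mv; rw [if_pos ⟨h2, hlow⟩]
        have hmvk : Mv k m = (m.minFac : Int) := by unfold Mv; rw [if_pos ⟨h2, by omega⟩]
        rw [hfm, hmvk, if_neg]
        rintro ⟨-, hlt⟩
        have : (m.minFac : Int) < (k:Int) := by exact_mod_cast (by omega : m.minFac < k)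
        omega
      · have hge : k ≤ m.minFac := by omega
        have hfm : f m = (m:Int) := by
          rw [hf]; unfold Mv; rw [if_neg (by omega)]
        by_cases hdvd : k ∣ m
        · have hmfk : m.minFac = k :=
            le_antisymm (Nat.minFac_le_of_dvd hk2 hdvd) hge
          have hkm : k ≤ m := Nat.le_of_dvd (by omega) hdvd
          have hmvk : Mv k m = (k:Int) := by
            unfold Mv; rw [if_pos ⟨h2, by omega⟩, hmfk]
          by_cases heq : m = k
          · rw [hfm, if_neg, hmvk, heq]
            rintro ⟨-, hlt⟩
            rw [heq] at hlt; omega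
          · have hlt' : (k:Int) < (m:Int) := by
              have : k < m := lt_of_le_of_ne hkm (Ne.symm heq)
              exact_mod_cast this
            rw [hfm, if_pos ⟨⟨by exact_mod_cast hkm, hm, hdvd⟩, hlt'⟩, hmvk]
        · have hne : m.minFac ≠ k := fun he => hdvd (he ▸ m.minFac_dvd)
          have hmv : Mv k m = (m:Int) := by
            unfold Mv; rw [if_neg (by omega)]
          rw [hfm, if_neg, hmv]
          rintro ⟨⟨-, -, hd⟩, -⟩
          exact hdvd hd
    · have hfm : f m = (m:Int) := by rw [hf]; unfold Mv; rw [if_neg (by omega)]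
      have hmv : Mv k m = (m:Int) := by unfold Mv; rw [if_neg (by omega)]
      rw [hfm, hmv, if_neg]
      rintro ⟨⟨hkm, -, -⟩, -⟩
      have : (m:Int) < 2 := by exact_mod_cast (by omega : m < 2)
      have : (2:Int) ≤ (k:Int) := by exact_mod_cast hk2
      omega
  · have hmv : Mv k m = (k:Int) := by
      unfold Mv; rw [if_pos ⟨h2, by omega⟩, hmf]
    rw [hfv, if_neg, hmv]
    rintro ⟨-, hlt⟩
    omega

/-- What B's marking pass with prime `k` does to one entry. -/
lemma B_mark_result {n : Int} {k m : Nat} (hkp : Nat.Prime k) (hm : (m:Int) ≤ n) :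
    (if (((k:Int)*(k:Int) ≤ (m:Int) ∧ (m:Int) ≤ n ∧ k ∣ m) ∧ Mv (k-1) m = (m:Int)) then (k:Int)
     else Mv (k-1) m) = Mv k m := by
  have hk2 := hkp.two_le
  have hkmf := (Nat.prime_def_minFac.mp hkp).2
  have hsq : ((k*k : Nat) : Int) = (k:Int)*(k:Int) := by push_cast; ring
  by_cases h2 : 2 ≤ m
  · by_cases hlow : m.minFac ≤ k - 1
    · have hmv1 : Mv (k-1) m = (m.minFac : Int) := by unfold Mv; rw [if_pos ⟨h2, hlow⟩]
      have hmvk : Mv k m = (m.minFac : Int) := by unfold Mv; rw [if_pos ⟨h2, by omega⟩]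
      rw [hmv1, hmvk, if_neg]
      rintro ⟨⟨hkk, -, -⟩, heq⟩
      have hfm : m.minFac = m := by exact_mod_cast heq
      have hkm : k*k ≤ m := by rw [← hsq] at hkk; exact_mod_cast hkk
      have : k ≤ k*k := Nat.le_mul_of_pos_left k (by omega)
      omega
    · have hge : k ≤ m.minFac := by omega
      have hmv1 : Mv (k-1) m = (m:Int) := by unfold Mv; rw [if_neg (by omega)]
      by_cases hdvd : k ∣ m
      · have hmfk : m.minFac = k := le_antisymm (Nat.minFac_le_of_dvd hk2 hdvd) hge
        have hmvk : Mv k m = (k:Int) := by unfold Mv; rw [if_pos ⟨h2, by omega⟩, hmfk]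
        by_cases heq : m = k
        · rw [hmv1, if_neg, hmvk, heq]
          rintro ⟨⟨hkk, -, -⟩, -⟩
          have hkm : k*k ≤ m := by rw [← hsq] at hkk; exact_mod_cast hkk
          have : k < k*k := by nlinarith
          omega
        · obtain ⟨t, ht⟩ := hdvd
          have ht2 : 2 ≤ t := by
            rcases Nat.lt_or_ge t 2 with h | h
            · interval_cases t <;> omega
            · exact h
          have hkt : k ≤ t := by
            by_contra hlt
            push_neg at hlt
            have hdvd2 : t.minFac ∣ m := (Nat.minFac_dvd t).trans ⟨k, by rw [ht]; ring⟩
            have h5 := Nat.minFac_le_of_dvd (minFac_two_le ht2) hdvd2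
            have h6 := Nat.minFac_le (show 0 < t by omega)
            omega
          have hm2 : k*k ≤ m := by rw [ht]; exact Nat.mul_le_mul_left k hkt
          rw [hmv1, if_pos, hmvk]
          refine ⟨⟨?_, hm, ⟨t, ht⟩⟩, rfl⟩
          rw [← hsq]; exact_mod_cast hm2
      · have hne : m.minFac ≠ k := fun he => hdvd (he ▸ m.minFac_dvd)
        have hmvk : Mv k m = (m:Int) := by unfold Mv; rw [if_neg (by omega)]
        rw [hmv1, hmvk, if_neg]
        rintro ⟨⟨-, -, hd⟩, -⟩
        exact hdvd hd
  · have hmv1 : Mv (k-1) m = (m:Int) := by unfold Mv; rw [if_neg (by omega)]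
    have hmvk : Mv k m = (m:Int) := by unfold Mv; rw [if_neg (by omega)]
    rw [hmv1, hmvk, if_neg]
    rintro ⟨⟨hkk, -, -⟩, -⟩
    have h4 : 4 ≤ k*k := Nat.mul_le_mul hk2 hk2
    have hkm : k*k ≤ m := by rw [← hsq] at hkk; exact_mod_cast hkk
    omega

/-- A's inner loop for a prime `k`, starting from `Mv (k-1)` (possibly with some
    entries of smallest factor exactly `k` already final, as after the prefill). -/
lemma A_round_prime (n : Int) (hn : 2 ≤ n) (k : Nat) (hkp : Nat.Prime k) (_hkn : (k:Int) < n)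
    (f : Nat → Int)
    (hf : ∀ m, m < (n+1).toNat → f m = Mv (k-1) m ∨ (2 ≤ m ∧ m.minFac = k ∧ f m = (k:Int))) :
    pvAInner n (k:Int) (rmap (n+1).toNat f) = rmap (n+1).toNat (Mv k) := by
  have hk2 := hkp.two_le
  have hk0 : (0:Int) < (k:Int) := by exact_mod_cast (by omega : 0 < k)
  unfold pvAInner
  have hfun : (fun (phi : Array Int) (j : Int) =>
        if pvGetI phi j > (k:Int) then pvSetI phi j (k:Int) else phi)
      = (fun phi j =>
        if (fun (_ x : Int) => decide ((k:Int) < x)) j (pvGetI phi j) = true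
        then pvSetI phi j (k:Int) else phi) := by
    funext phi j; simp
  have hbounds : ∀ j ∈ PySem.List.pyRange (k:Int) (n+1) (k:Int), 0 ≤ j ∧ j < (((n+1).toNat : Nat) : Int) := by
    intro j hj
    rw [PySem.List.mem_pyRange_iff_of_pos hk0] at hj
    refine ⟨by omega, by omega⟩
  rw [hfun, mark_fold (fun _ x => decide ((k:Int) < x)) (k:Int) (n+1).toNat
    (PySem.List.pyRange (k:Int) (n+1) (k:Int)) f (nodup_pyRange_pos hk0) hbounds]
  apply rmap_congr
  intro m hm
  have hmn : (m:Int) ≤ n := by omega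
  have hiff : ((m:Int) ∈ PySem.List.pyRange (k:Int) (n+1) (k:Int)) ↔
      ((k:Int) ≤ (m:Int) ∧ (m:Int) ≤ n ∧ k ∣ m) :=
    mem_pyRange_step (by omega : 0 < k) (dvd_refl (k:Int)) m
  simp only [hiff, decide_eq_true_eq]
  exact A_mark_result hkp hmn f (hf m hm)

/-- A's outer loop, by downward induction on the remaining fuel. -/
lemma A_outer (n : Int) (hn : 2 ≤ n) :
    ∀ (d k : Nat), 2 ≤ k → (k = 2 ∨ (k:Int) ≤ n) → (n - (k:Int)).toNat = d →
    pvAOuter n (k:Int) d (rmap (n+1).toNat (AState n k)) = rmap (n+1).toNat spfI := by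
  intro d
  induction d with
  | zero =>
    intro k hk2 hkle hd
    have hkn : ¬ ((k:Int) < n) := by omega
    unfold pvAOuter
    by_cases hk2' : k = 2
    · subst hk2'
      push_cast at hkn
      have hn2 : n = 2 := by omega
      subst hn2
      apply rmap_congr
      intro m hm
      have hm3 : m < 3 := by omega
      unfold AState Gst pvPrefillSet
      rw [if_pos rfl]
      have hfd : PySem.Int.floordiv (2+1) 2 = 1 := by decide
      rw [hfd, PySem.List.pyRange_one_eq_nil (by norm_num)]
      simp only [List.map_nil, List.not_mem_nil, if_false]
      interval_cases m <;> simp [spfI]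
    · have hkn' : (k:Int) ≤ n := hkle.resolve_left hk2'
      have hkn2 : (k:Int) = n := by omega
      apply rmap_congr
      intro m hm
      unfold AState
      rw [if_neg hk2']
      apply Mv_eq_spfI
      intro h2
      by_cases hle : m.minFac ≤ k - 1
      · exact Or.inl hle
      · right
        have hmk : m ≤ n.toNat := by omega
        have hkk : k = n.toNat := by omega
        have h1 : m.minFac ≤ m := Nat.minFac_le (by omega)
        have h2' : m.minFac = m := by omega
        exact Nat.prime_def_minFac.mpr ⟨h2, h2'⟩
  | succ d ih =>
    intro k hk2 hkle hd
    have hkn : (k:Int) < n := by omega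
    unfold pvAOuter
    rw [if_pos hkn]
    have hgoal : (if pvGetI (rmap (n+1).toNat (AState n k)) (k:Int) == (k:Int)
          then pvAInner n (k:Int) (rmap (n+1).toNat (AState n k))
          else rmap (n+1).toNat (AState n k)) = rmap (n+1).toNat (AState n (k+1)) := by
      have hget : pvGetI (rmap (n+1).toNat (AState n k)) (k:Int) = AState n k k :=
        getI_rmap k (by omega)
      by_cases hk2' : k = 2
      · subst hk2'
        have hnotmem : (((2:Nat)):Int) ∉ pvPrefillSet n := by
          intro hmem
          unfold pvPrefillSet at hmem
          obtain ⟨k', hk', he⟩ := List.mem_map.mp hmem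
          rw [PySem.List.mem_pyRange_one] at hk'
          push_cast at he
          omega
        have hG2 : AState n 2 2 = 2 := by
          unfold AState Gst
          rw [if_pos rfl, if_neg hnotmem]
          norm_num
        rw [hget, hG2, if_pos (by norm_num)]
        have hres := A_round_prime n hn 2 Nat.prime_two (by exact_mod_cast hkn) (AState n 2) ?hf
        case hf =>
          intro m hm
          unfold AState Gst
          rw [if_pos rfl]
          by_cases hmem : (m:Int) ∈ pvPrefillSet n
          · right
            have hmem2 := hmem
            unfold pvPrefillSet at hmem2
            obtain ⟨k', hk', he⟩ := List.mem_map.mp hmem2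
            rw [PySem.List.mem_pyRange_one] at hk'
            have hm4 : 4 ≤ m := by omega
            have hdvd : 2 ∣ m := by
              have : (2:Int) ∣ (m:Int) := ⟨k', by omega⟩
              exact_mod_cast this
            have hmf : m.minFac = 2 := by
              have h1 := Nat.minFac_le_of_dvd (by omega) hdvd
              have h2 := minFac_two_le (by omega : 2 ≤ m)
              omega
            exact ⟨by omega, hmf, by rw [if_pos hmem]; norm_num⟩
          · left
            rw [if_neg hmem, Mv_one]
        rw [show ((2:Nat):Int) = (2:Int) by norm_num] at hres ⊢
        rw [hres]
        apply rmap_congr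
        intro m hm
        unfold AState
        rw [if_neg (by omega)]
      · have hAk : AState n k = Mv (k-1) := by unfold AState; rw [if_neg hk2']
        by_cases hp : k.Prime
        · have hself : AState n k k = (k:Int) := by rw [hAk]; exact Mv_prime_self hp
          rw [hget, hself, if_pos (by simp)]
          rw [hAk, A_round_prime n hn k hp hkn (Mv (k-1)) (fun m _ => Or.inl rfl)]
          apply rmap_congr
          intro m hm
          unfold AState
          rw [if_neg (by omega)]
          norm_num
        · have hlt := minFac_lt_of_not_prime hk2 hp
          have hself : AState n k k = (k.minFac : Int) := by
            rw [hAk]; unfold Mv; rw [if_pos ⟨hk2, by omega⟩]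
          have hne : ((k.minFac : Int) == (k:Int)) = false := by
            simp only [beq_eq_false_iff_ne, ne_eq]
            intro he
            have : k.minFac = k := by exact_mod_cast he
            omega
          rw [hget, hself, hne, if_neg (by simp)]
          have hstep : rmap (n+1).toNat (AState n k) = rmap (n+1).toNat (AState n (k+1)) := by
            apply rmap_congr
            intro m hm
            rw [hAk]
            unfold AState
            rw [if_neg (by omega)]
            simpa using Mv_step_not_prime hk2 hp m
          rw [hstep]
    rw [hgoal]
    have := ih (k+1) (by omega) (by right; push_cast; omega) (by push_cast; omega)
    rw [show (((k+1:Nat)):Int) = (k:Int)+1 by push_cast; ring] at this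
    exact this

/-- B's outer loop, by downward induction on the remaining fuel. -/
lemma B_outer (n : Int) (hn : 2 ≤ n) :
    ∀ (d k : Nat), 2 ≤ k → n.toNat + 1 - k = d →
    pvBOuter n k d (rmap (n+1).toNat (Mv (k-1))) = rmap (n+1).toNat spfI := by
  intro d
  induction d with
  | zero =>
    intro k hk2 hd
    have hkn : n < (k:Int) := by omega
    unfold pvBOuter
    apply rmap_congr
    intro m hm
    apply Mv_eq_spfI
    intro h2
    by_cases hle : m.minFac ≤ k - 1
    · exact Or.inl hle
    · right
      by_contra hp
      have hsq := Nat.minFac_sq_le_self (show 0 < m by omega) hp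
      have hm2 : m ≤ n.toNat := by omega
      have h5 : m.minFac * m.minFac ≤ n.toNat := by
        rw [← pow_two]; omega
      have h6 : n.toNat < k * k := by
        have hkk : n.toNat < k := by omega
        have : k ≤ k * k := Nat.le_mul_of_pos_left k (by omega)
        omega
      have := Nat.mul_self_lt_mul_self_iff.mp (by omega : m.minFac * m.minFac < k * k)
      omega
  | succ d ih =>
    intro k hk2 hd
    unfold pvBOuter
    by_cases hq : (k:Int) * (k:Int) ≤ n
    · rw [if_pos hq]
      have hksq : k * k ≤ n.toNat := by
        have : ((k*k : Nat) : Int) ≤ n := by push_cast; exact hq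
        omega
      have hkn : k ≤ n.toNat := by
        have : k ≤ k * k := Nat.le_mul_of_pos_left k (by omega)
        omega
      have hgoal : (if pvGetI (rmap (n+1).toNat (Mv (k-1))) (k:Int) == (k:Int)
            then (PySem.List.pyRange ((k:Int)*(k:Int)) (n+1) (k:Int)).foldl
              (fun spf' j => if pvGetI spf' j == j then pvSetI spf' j (k:Int) else spf')
              (rmap (n+1).toNat (Mv (k-1)))
            else rmap (n+1).toNat (Mv (k-1))) = rmap (n+1).toNat (Mv k) := by
        have hget : pvGetI (rmap (n+1).toNat (Mv (k-1))) (k:Int) = Mv (k-1) k :=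
          getI_rmap k (by omega)
        by_cases hp : k.Prime
        · rw [hget, Mv_prime_self hp, if_pos (by simp)]
          have hk0 : (0:Int) < (k:Int) := by exact_mod_cast (by omega : 0 < k)
          have hfun : (fun (spf' : Array Int) (j : Int) =>
                if pvGetI spf' j == j then pvSetI spf' j (k:Int) else spf')
              = (fun spf' j =>
                if (fun (jj x : Int) => x == jj) j (pvGetI spf' j) = true
                then pvSetI spf' j (k:Int) else spf') := by
            funext spf' j; simp
          have hbounds : ∀ j ∈ PySem.List.pyRange ((k:Int)*(k:Int)) (n+1) (k:Int),
              0 ≤ j ∧ j < (((n+1).toNat : Nat) : Int) := by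
            intro j hj
            rw [PySem.List.mem_pyRange_iff_of_pos hk0] at hj
            have h40 : (0:Int) ≤ (k:Int)*(k:Int) := by positivity
            refine ⟨by omega, by omega⟩
          rw [hfun, mark_fold (fun jj x => x == jj) (k:Int) (n+1).toNat
            (PySem.List.pyRange ((k:Int)*(k:Int)) (n+1) (k:Int)) (Mv (k-1))
            (nodup_pyRange_pos hk0) hbounds]
          apply rmap_congr
          intro m hm
          have hmn : (m:Int) ≤ n := by omega
          have hiff : ((m:Int) ∈ PySem.List.pyRange ((k:Int)*(k:Int)) (n+1) (k:Int)) ↔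
              ((k:Int)*(k:Int) ≤ (m:Int) ∧ (m:Int) ≤ n ∧ k ∣ m) :=
            mem_pyRange_step (by omega : 0 < k) (dvd_mul_right (k:Int) (k:Int)) m
          simp only [hiff, beq_iff_eq]
          exact B_mark_result hp hmn
        · have hlt := minFac_lt_of_not_prime hk2 hp
          have hself : Mv (k-1) k = (k.minFac : Int) := by
            unfold Mv; rw [if_pos ⟨hk2, by omega⟩]
          have hne : ((k.minFac : Int) == (k:Int)) = false := by
            simp only [beq_eq_false_iff_ne, ne_eq]
            intro he
            have : k.minFac = k := by exact_mod_cast he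
            omega
          rw [hget, hself, hne, if_neg (by simp)]
          exact rmap_congr (fun m _ => Mv_step_not_prime hk2 hp m)
      rw [hgoal]
      have := ih (k+1) (by omega) (by omega)
      simpa using this
    · rw [if_neg hq]
      apply rmap_congr
      intro m hm
      apply Mv_eq_spfI
      intro h2
      by_cases hle : m.minFac ≤ k - 1
      · exact Or.inl hle
      · right
        by_contra hp
        have hsq := Nat.minFac_sq_le_self (show 0 < m by omega) hp
        have hm2 : m ≤ n.toNat := by omega
        have h5 : m.minFac * m.minFac ≤ n.toNat := by
          rw [← pow_two]; omega
        have h6 : n.toNat < k * k := by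
          have : ¬ ((k*k : Nat) : Int) ≤ n := by push_cast; exact hq
          omega
        have := Nat.mul_self_lt_mul_self_iff.mp (by omega : m.minFac * m.minFac < k * k)
        omega

/-- The conditional accumulation in B is the filtered sum in A. -/
lemma fold_filter_sum (l : List Int) : ∀ (c : Int),
    l.foldl (fun t v => if v != 2 && v != 3 then t + v else t) c
      = c + ((l.filter (fun v => v != 2)).filter (fun v => v != 3)).sum := by
  induction l with
  | nil => intro c; simp
  | cons x t ih =>
    intro c
    by_cases h2 : x = 2
    · subst h2
      have hf2 : ((2:Int) != 2) = false := by decide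
      simp only [List.foldl_cons, List.filter_cons, hf2, Bool.false_eq_true, if_false]
      exact ih c
    · by_cases h3 : x = 3
      · subst h3
        have hb2 : ((3:Int) != 2) = true := by decide
        have hb3 : ((3:Int) != 3) = false := by decide
        simp only [List.foldl_cons, List.filter_cons, hb2, hb3, Bool.false_eq_true,
          if_false, if_true]
        exact ih c
      · have hb2 : (x != 2) = true := by simp [h2]
        have hb3 : (x != 3) = true := by simp [h3]
        simp only [List.foldl_cons, List.filter_cons, hb2, hb3, Bool.and_self, if_true]
        rw [ih]
        simp only [List.sum_cons]
        ring

lemma foldl_add_eq_sum (l : List Int) : ∀ (c : Int),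
    l.foldl (fun acc v => acc + v) c = c + l.sum := by
  induction l with
  | nil => intro c; simp
  | cons x t ih => intro c; simp only [List.foldl_cons, List.sum_cons, ih]; ring

lemma range_as_rmap (n : Int) (hn : 0 ≤ n) :
    (PySem.List.pyRange 0 (n+1) 1).toArray = rmap (n+1).toNat (fun m => (m:Int)) := by
  rw [PySem.List.pyRange_one]
  unfold rmap
  apply congrArg List.toArray
  have : (n + 1 - 0).toNat = (n+1).toNat := by omega
  rw [this]
  apply List.map_congr_left
  intro a _
  omega

lemma prefill_eq (n : Int) (hn : 2 ≤ n) :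
    (PySem.List.pyRange 2 (PySem.Int.floordiv (n+1) 2) 1).foldl
        (fun phi k => pvSetI phi (2*k) 2) (rmap (n+1).toNat (fun m => (m:Int)))
      = rmap (n+1).toNat (Gst n) := by
  have hfd : PySem.Int.floordiv (n+1) 2 = (n+1) / 2 := by
    unfold PySem.Int.floordiv
    rw [Int.fdiv_eq_ediv]
    simp
  have hmem : ∀ j ∈ pvPrefillSet n, 4 ≤ j ∧ j ≤ n - 1 := by
    intro j hj
    unfold pvPrefillSet at hj
    obtain ⟨k', hk', he⟩ := List.mem_map.mp hj
    rw [PySem.List.mem_pyRange_one] at hk'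
    rw [hfd] at hk'
    omega
  have hstep : (PySem.List.pyRange 2 (PySem.Int.floordiv (n+1) 2) 1).foldl
        (fun phi k => pvSetI phi (2*k) 2) (rmap (n+1).toNat (fun m => (m:Int)))
      = (pvPrefillSet n).foldl (fun phi j => pvSetI phi j 2)
          (rmap (n+1).toNat (fun m => (m:Int))) := by
    unfold pvPrefillSet
    rw [List.foldl_map]
  rw [hstep]
  have hfun : (fun (phi : Array Int) (j : Int) => pvSetI phi j 2)
      = (fun phi j => if (fun (_ _ : Int) => true) j (pvGetI phi j) = true
          then pvSetI phi j 2 else phi) := by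
    funext phi j; simp
  have hnd : (pvPrefillSet n).Nodup := by
    unfold pvPrefillSet
    refine List.Nodup.map ?_ (PySem.List.nodup_pyRange_one 2 _)
    intro x y h
    have h2 : (2:Int) * x = 2 * y := h
    omega
  have hbounds : ∀ j ∈ pvPrefillSet n, 0 ≤ j ∧ j < (((n+1).toNat : Nat) : Int) := by
    intro j hj
    have := hmem j hj
    exact ⟨by omega, by omega⟩
  rw [hfun, mark_fold (fun _ _ => true) 2 (n+1).toNat (pvPrefillSet n)
    (fun m => (m:Int)) hnd hbounds]
  apply rmap_congr
  intro m hm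
  unfold Gst
  simp

/-- The whole equivalence for `n ≥ 2`. -/
lemma main_ge2 (n : Int) (hn : 2 ≤ n) : sieves_smpf n = sieves_smpf_alt n := by
  unfold sieves_smpf sieves_smpf_alt
  rw [range_as_rmap n (by omega), prefill_eq n hn]
  -- A's outer loop
  have hA := A_outer n hn ((n-2).toNat) 2 (by omega) (Or.inl rfl) (by norm_num)
  rw [show ((2:Nat):Int) = (2:Int) by norm_num] at hA
  rw [show rmap (n+1).toNat (AState n 2) = rmap (n+1).toNat (Gst n) by
    unfold AState; rw [if_pos rfl]] at hA
  rw [hA]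
  -- B's outer loop
  have hMv1 : rmap (n+1).toNat (fun m => (m:Int)) = rmap (n+1).toNat (Mv (2-1)) :=
    rmap_congr (fun m _ => (Mv_one m).symm)
  have hB := B_outer n hn (n.toNat + 1 - 2) 2 (by omega) rfl
  rw [hMv1, show ((n:Int)-1).toNat = n.toNat + 1 - 2 by omega, hB]
  unfold rmap
  rw [List.filter_toArray, List.filter_toArray, List.foldl_toArray, List.foldl_toArray,
    fold_filter_sum, foldl_add_eq_sum]

lemma main_neg (n : Int) (hn : n ≤ -1) : sieves_smpf n = sieves_smpf_alt n := by
  have hsetnil : ∀ (j v : Int), pvSetI (([]:List Int).toArray) j v = ([]:List Int).toArray := by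
    intro j v
    unfold pvSetI
    apply Array.toList_inj.mp
    simp
  have hnil : PySem.List.pyRange 0 (n+1) 1 = ([] : List Int) :=
    PySem.List.pyRange_one_eq_nil (by omega)
  have hfold : (PySem.List.pyRange 2 (PySem.Int.floordiv (n+1) 2) 1).foldl
      (fun phi k => pvSetI phi (2*k) 2) (([]:List Int).toArray) = ([]:List Int).toArray := by
    generalize PySem.List.pyRange 2 (PySem.Int.floordiv (n+1) 2) 1 = L
    induction L with
    | nil => rfl
    | cons x t ih => simp [List.foldl_cons, hsetnil, ih]
  have hfuelA : ((n:Int)-2).toNat = 0 := by omega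
  have hfuelB : ((n:Int)-1).toNat = 0 := by omega
  unfold sieves_smpf sieves_smpf_alt
  rw [hnil, hfold, hfuelA, hfuelB]
  simp only [pvAOuter, pvBOuter]
  rw [List.filter_toArray, List.filter_toArray, List.foldl_toArray, List.foldl_toArray]
  simp

-- ===== VERDICT (by name: the statement is the Claim_ definition above) =====
theorem sieves_smpf_spec : Claim_equal_sieves_smpf := by
  intro n _
  unfold Spec_sieves_smpf
  by_cases h : 2 ≤ n
  · exact main_ge2 n h
  · by_cases h0 : n < 0
    · exact main_neg n (by omega)
    · push_neg at h h0
      interval_cases n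
      · decide
      · decide
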